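-- pv_equiv track=rewrite | github.com/pypi-data/pypi-mirror-288 | packages/csvpath/csvpath-0.0.43.tar.gz/csvpath-0.0.43/csvpath/csvpath.py | _find_scan_match_modify
-- ===== SOURCE A (Python) =====
-- def _find_scan_match_modify(data):
--     scan = ""
--     matches = ""
--     modify = ""
--     p = 0
--     for i, c in enumerate(data):
--         if p == 0:
--             scan = scan + c
--         elif p == 1:
--             matches = matches + c
--         else:
--             modify = modify + c
--         if c == "]":
--             p = p + 1
--     scan = scan.strip()
--     scan = scan if len(scan) > 0 else None
--     matches = matches.strip()
--     matches = matches if len(matches) > 0 else None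
--     modify = modify.strip()
--     modify = modify if len(modify) > 0 else None
--     return scan, matches, modify
-- ===== SOURCE B (Python) =====
-- def _find_scan_match_modify(data):
--     i1 = data.find("]")
--     if i1 == -1:
--         scan, matches, modify = data, "", ""
--     else:
--         i2 = data.find("]", i1 + 1)
--         if i2 == -1:
--             scan, matches, modify = data[:i1 + 1], data[i1 + 1:], ""
--         else:
--             scan, matches, modify = data[:i1 + 1], data[i1 + 1:i2 + 1], data[i2 + 1:]
--     return scan.strip() or None, matches.strip() or None, modify.strip() or None
-- ===== Notes on version B (the rewrite author's own statement) =====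
-- stated objective: simpler
-- what changed: A's per-character state machine (a counter p routing each char into one of three accumulated strings) is replaced by two str.find calls locating the first and second ']' and three slices, with the same strip-or-None postprocessing.
import Mathlib
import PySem

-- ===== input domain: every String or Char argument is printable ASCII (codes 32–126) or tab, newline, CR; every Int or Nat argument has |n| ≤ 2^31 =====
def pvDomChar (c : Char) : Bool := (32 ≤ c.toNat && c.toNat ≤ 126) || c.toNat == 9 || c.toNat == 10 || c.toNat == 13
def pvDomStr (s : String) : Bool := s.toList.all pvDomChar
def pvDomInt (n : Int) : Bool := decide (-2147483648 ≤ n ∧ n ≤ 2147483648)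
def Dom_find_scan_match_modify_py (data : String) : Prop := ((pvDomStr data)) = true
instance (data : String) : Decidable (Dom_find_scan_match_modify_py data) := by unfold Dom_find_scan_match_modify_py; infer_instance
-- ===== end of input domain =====

-- B replaces A's character-by-character state machine by two find() calls and three
-- slices (objective: simpler).

-- ===== PORT A =====
-- A's per-character loop step: append c to the segment selected by p, then bump p on ']'.
def pvStepA (st : List Char × List Char × List Char × Nat) (c : Char) :
    List Char × List Char × List Char × Nat :=
  let (scan, ms, md, p) := st
  let (scan, ms, md) :=
    if p == 0 then (scan ++ [c], ms, md)
    else if p == 1 then (scan, ms ++ [c], md)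
    else (scan, ms, md ++ [c])
  let p := if c == ']' then p + 1 else p
  (scan, ms, md, p)

-- 'x.strip(); x if len(x) > 0 else None'
def pvFinishA (l : List Char) : Option String :=
  let t := PySem.Chars.strip l
  if t.length > 0 then some (String.ofList t) else none

def find_scan_match_modify_py (data : String) : Option String × Option String × Option String :=
  let (scan, ms, md, _) := data.toList.foldl pvStepA ([], [], [], 0)
  (pvFinishA scan, pvFinishA ms, pvFinishA md)

-- ===== PORT B =====
-- 'x.strip() or None'
def pvFinishB (l : List Char) : Option String :=
  let t := PySem.Chars.strip l
  if t = [] then none else some (String.ofList t)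

def find_scan_match_modify_py_alt (data : String) : Option String × Option String × Option String :=
  let i1 := PySem.Str.find data "]"
  let (scan, ms, md) :=
    if i1 == -1 then (data.toList, ([] : List Char), ([] : List Char))
    else
      let i2 := PySem.Str.findFrom data "]" (i1 + 1)
      if i2 == -1 then
        (PySem.Chars.slice data.toList none (some (i1 + 1)),
         PySem.Chars.slice data.toList (some (i1 + 1)) none, ([] : List Char))
      else
        (PySem.Chars.slice data.toList none (some (i1 + 1)),
         PySem.Chars.slice data.toList (some (i1 + 1)) (some (i2 + 1)),
         PySem.Chars.slice data.toList (some (i2 + 1)) none)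
  (pvFinishB scan, pvFinishB ms, pvFinishB md)

-- ===== PRECONDITION & SPEC =====
def Spec_find_scan_match_modify_py (data : String) (out : Option String × Option String × Option String) : Prop := out = find_scan_match_modify_py_alt data
instance (data : String) (out : Option String × Option String × Option String) : Decidable (Spec_find_scan_match_modify_py data out) := by unfold Spec_find_scan_match_modify_py; infer_instance

-- ===== CLAIM (what is proved, stated in full; the proofs are below) =====
def Claim_equal_find_scan_match_modify_py : Prop := ∀ (data : String), Dom_find_scan_match_modify_py data → Spec_find_scan_match_modify_py data (find_scan_match_modify_py data)

-- ===== LEMMAS AND PROOFS =====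

-- split a list at the first ']' (inclusive on the left)
def pvCut (l : List Char) : List Char × List Char :=
  if ']' ∈ l then (l.takeWhile (· ≠ ']') ++ [']'], (l.dropWhile (· ≠ ']')).tail)
  else (l, [])

theorem pvCut_no (x : List Char) (hx : ']' ∉ x) : pvCut x = (x, []) := by
  unfold pvCut
  rw [if_neg hx]

theorem pvFinish_eq (l : List Char) : pvFinishA l = pvFinishB l := by
  unfold pvFinishA pvFinishB
  rcases h : PySem.Chars.strip l with _ | ⟨c, t⟩ <;> simp

theorem pvLoop2 (l : List Char) : ∀ s m mo p, 2 ≤ p →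
    l.foldl pvStepA (s, m, mo, p) = (s, m, mo ++ l, l.foldl (fun q c => if c == ']' then q + 1 else q) p) := by
  induction l with
  | nil => intro s m mo p hp; simp
  | cons c rest ih =>
    intro s m mo p hp
    simp only [List.foldl_cons, pvStepA]
    have h0 : (p == 0) = false := by simp; omega
    have h1 : (p == 1) = false := by simp; omega
    rw [h0, h1]
    simp only [Bool.false_eq_true, if_false]
    by_cases hc : c = ']'
    · subst hc; simp only [beq_self_eq_true, if_true]
      rw [ih _ _ _ _ (by omega)]
      simp
    · have : (c == ']') = false := by simp [hc]
      rw [this]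
      simp only [Bool.false_eq_true, if_false]
      rw [ih _ _ _ _ hp]
      simp

theorem pvCut_rb (rest : List Char) : pvCut (']' :: rest) = ([']'], rest) := by
  simp [pvCut]

theorem pvCut_cons_ne (c : Char) (rest : List Char) (hc : c ≠ ']') :
    pvCut (c :: rest) = (c :: (pvCut rest).1, (pvCut rest).2) := by
  by_cases hm : ']' ∈ rest <;>
    simp [pvCut, hm, hc, Ne.symm hc]

theorem pvLoop1 (l : List Char) : ∀ s m mo,
    ∃ p, l.foldl pvStepA (s, m, mo, 1) = (s, m ++ (pvCut l).1, mo ++ (pvCut l).2, p) := by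
  induction l with
  | nil => intro s m mo; exact ⟨1, by simp [pvCut]⟩
  | cons c rest ih =>
    intro s m mo
    simp only [List.foldl_cons, pvStepA]
    have e0 : ((1:Nat) == 0) = false := by decide
    have e1 : ((1:Nat) == 1) = true := by decide
    simp only [e0, e1, Bool.false_eq_true, if_false, if_true]
    by_cases hc : c = ']'
    · subst hc
      simp only [beq_self_eq_true, if_true, pvCut_rb]
      have h2 := pvLoop2 rest s (m ++ [']']) mo 2 (by omega)
      exact ⟨_, by rw [h2]⟩
    · have hb : (c == ']') = false := by simp [hc]
      simp only [hb, Bool.false_eq_true, if_false]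
      obtain ⟨p, hp⟩ := ih s (m ++ [c]) mo
      exact ⟨p, by rw [hp, pvCut_cons_ne c rest hc]; simp⟩

theorem pvLoop0 (l : List Char) :
    ∃ p, l.foldl pvStepA ([], [], [], 0) =
      ((pvCut l).1, (pvCut (pvCut l).2).1, (pvCut (pvCut l).2).2, p) := by
  suffices h : ∀ l s m mo, ∃ p, List.foldl pvStepA (s, m, mo, 0) l =
      (s ++ (pvCut l).1, m ++ (pvCut (pvCut l).2).1, mo ++ (pvCut (pvCut l).2).2, p) by
    obtain ⟨p, hp⟩ := h l [] [] []
    exact ⟨p, by simpa using hp⟩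
  intro l
  induction l with
  | nil => intro s m mo; exact ⟨0, by simp [pvCut]⟩
  | cons c rest ih =>
    intro s m mo
    simp only [List.foldl_cons, pvStepA]
    have e0 : ((0:Nat) == 0) = true := by decide
    simp only [e0, if_true]
    by_cases hc : c = ']'
    · subst hc
      simp only [beq_self_eq_true, if_true, pvCut_rb]
      obtain ⟨p, hp⟩ := pvLoop1 rest (s ++ [']']) m mo
      exact ⟨p, by rw [hp]⟩
    · have hb : (c == ']') = false := by simp [hc]
      simp only [hb, Bool.false_eq_true, if_false]
      obtain ⟨p, hp⟩ := ih (s ++ [c]) m mo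
      exact ⟨p, by rw [hp, pvCut_cons_ne c rest hc]; simp⟩

-- the first ']' sits right after the ']'-free prefix
theorem pvDrop_cut (l : List Char) (h : ']' ∈ l) :
    l.drop (l.takeWhile (fun x => !decide (x = ']')) ).length = ']' :: (pvCut l).2 := by
  have htdw : l.takeWhile (fun x => !decide (x = ']')) ++ l.dropWhile (fun x => !decide (x = ']')) = l :=
    List.takeWhile_append_dropWhile
  have hdrop : l.drop (l.takeWhile (fun x => !decide (x = ']')) ).length
      = l.dropWhile (fun x => !decide (x = ']')) := by
    have h' := List.drop_left' (l₁ := l.takeWhile (fun x => !decide (x = ']')))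
      (l₂ := l.dropWhile (fun x => !decide (x = ']')))
      (i := (l.takeWhile (fun x => !decide (x = ']'))).length) rfl
    rw [htdw] at h'
    exact h'
  have hne : l.dropWhile (fun x => !decide (x = ']')) ≠ [] := by
    intro hnil
    rw [hnil, List.append_nil] at htdw
    have := List.mem_takeWhile_imp (p := fun x => !decide (x = ']')) (htdw ▸ h)
    simp at this
  have hhead : (l.dropWhile (fun x => !decide (x = ']'))).head hne = ']' := by
    have := List.head_dropWhile_not (fun x => !decide (x = ']')) hne
    simpa using this
  have hcons : l.dropWhile (fun x => !decide (x = ']'))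
      = ']' :: (l.dropWhile (fun x => !decide (x = ']'))).tail := by
    conv_lhs => rw [← List.cons_head_tail hne]
    rw [hhead]
  rw [hdrop, hcons]
  simp [pvCut, h]

theorem pvFind_none (l : List Char) (h : ']' ∉ l) :
    PySem.Chars.find l [']'] = -1 := by
  rw [PySem.Chars.find_eq_neg_one_iff]
  rw [List.singleton_infix_iff]
  exact h

-- find on a singleton pattern is the length of the leading ']'-free prefix
theorem pvFind_singleton (l : List Char) (h : ']' ∈ l) :
    PySem.Chars.find l [']'] = ((l.takeWhile (fun x => !decide (x = ']'))).length : Int) := by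
  have hinf : [']'] <:+: l := (List.singleton_infix_iff _ _).2 h
  have h0 : 0 ≤ PySem.Chars.find l [']'] := (PySem.Chars.find_nonneg_iff _ _).2 hinf
  obtain ⟨hpre, hmin⟩ := PySem.Chars.find_spec h0
  set j := (PySem.Chars.find l [']']).toNat with hj
  set n := (l.takeWhile (fun x => !decide (x = ']'))).length with hn
  have hpn : [']'] <+: l.drop n := by
    rw [pvDrop_cut l h]
    exact ⟨(pvCut l).2, rfl⟩
  have hjn : j = n := by
    rcases Nat.lt_trichotomy j n with hlt | heq | hgt
    · -- j < n : l[j] would be a takeWhile element equal to ']'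
      exfalso
      obtain ⟨l', hl'⟩ := List.cons_prefix_iff.1 hpre
      have hjlen : j < l.length := by
        have : n ≤ l.length := by
          rw [hn]; exact (List.takeWhile_sublist _).length_le
        omega
      have hgetj : l[j] = ']' := by
        have h0get : (l.drop j)[0]'(by simp [hl'.1]) = ']' := by simp [hl'.1]
        simp only [List.getElem_drop, Nat.add_zero] at h0get
        exact h0get
      have htake : l.take n = l.takeWhile (fun x => !decide (x = ']')) := by
        have h' := List.take_left' (l₁ := l.takeWhile (fun x => !decide (x = ']')))
          (l₂ := l.dropWhile (fun x => !decide (x = ']'))) (i := n) rfl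
        rw [List.takeWhile_append_dropWhile] at h'
        exact h'
      have hjt : j < (l.take n).length := by simp; omega
      have helem : (l.take n)[j]'hjt = ']' := by rw [List.getElem_take]; exact hgetj
      have hm2 : (l.take n)[j]'hjt ∈ l.take n := List.getElem_mem _
      rw [helem, htake] at hm2
      have := List.mem_takeWhile_imp hm2
      simp at this
    · exact heq
    · exact absurd hpn (hmin n hgt)
  omega

-- the slices B carves are exactly the pvCut pieces
theorem pvTake_cut (l : List Char) (h : ']' ∈ l) :
    l.take ((l.takeWhile (fun x => !decide (x = ']'))).length + 1) = (pvCut l).1 ∧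
    l.drop ((l.takeWhile (fun x => !decide (x = ']'))).length + 1) = (pvCut l).2 := by
  set n := (l.takeWhile (fun x => !decide (x = ']'))).length with hn
  have hdrop := pvDrop_cut l h
  constructor
  · have : l.take (n + 1) = l.take n ++ (l.drop n).take 1 := by
      rw [← List.take_add]
    rw [this, hdrop]
    have htake : l.take n = l.takeWhile (fun x => !decide (x = ']')) := by
      have h' := List.take_left' (l₁ := l.takeWhile (fun x => !decide (x = ']')))
        (l₂ := l.dropWhile (fun x => !decide (x = ']'))) (i := n) rfl
      rw [List.takeWhile_append_dropWhile] at h'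
      exact h'
    rw [htake]
    simp [pvCut, h]
  · have : l.drop (n + 1) = (l.drop n).drop 1 := by
      rw [List.drop_drop]
    rw [this, hdrop]
    rfl

-- ===== VERDICT (by name: the statement is the Claim_ definition above) =====
theorem find_scan_match_modify_py_spec : Claim_equal_find_scan_match_modify_py := by
  intro data _
  show find_scan_match_modify_py data = find_scan_match_modify_py_alt data
  obtain ⟨p, hp⟩ := pvLoop0 data.toList
  unfold find_scan_match_modify_py find_scan_match_modify_py_alt
  rw [hp]
  have hsub : "]".toList = [']'] := rfl
  simp only [PySem.Str.find_eq, PySem.Str.findFrom_eq, hsub,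
    PySem.Chars.slice_eq_listSlice]
  by_cases hmem : ']' ∈ data.toList
  case neg =>
    rw [pvFind_none _ hmem]
    simp [pvCut, hmem, pvFinish_eq]
  case pos =>
    set l := data.toList with hl
    set n := (l.takeWhile (fun x => !decide (x = ']'))).length with hn
    have hfind : PySem.Chars.find l [']'] = (n : Int) := pvFind_singleton l hmem
    have hnlt : n < l.length := by
      have hdc := pvDrop_cut l hmem
      have : (l.drop n).length = (']' :: (pvCut l).2).length := by rw [hdc]
      simp at this
      omega
    have hne1 : (((n : Int)) == -1) = false := by
      simp only [beq_eq_false_iff_ne, ne_eq]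
      omega
    rw [hfind, hne1]
    simp only [Bool.false_eq_true, if_false]
    have hcast : (n : Int) + 1 = ((n + 1 : Nat) : Int) := by push_cast; ring
    rw [hcast, PySem.Chars.findFrom_natCast l [']'] (n+1) (by omega)]
    obtain ⟨htk, hdr⟩ := pvTake_cut l hmem
    rw [hdr]
    by_cases hm2 : ']' ∈ (pvCut l).2
    case neg =>
      rw [pvFind_none _ hm2]
      simp only [beq_self_eq_true, if_true]
      rw [PySem.List.slice_to_natCast, PySem.List.slice_from_natCast, htk, hdr,
        pvCut_no _ hm2]
      simp [pvFinish_eq]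
    case pos =>
      set r := (pvCut l).2 with hr
      set m := (r.takeWhile (fun x => !decide (x = ']'))).length with hm
      have hfind2 : PySem.Chars.find r [']'] = (m : Int) := pvFind_singleton r hm2
      rw [hfind2]
      rw [if_neg (by omega : ¬ ((m : Int) = -1))]
      have hne3 : ((((n + 1 : Nat) : Int) + (m : Int)) == -1) = false := by
        simp only [beq_eq_false_iff_ne, ne_eq]
        omega
      rw [hne3]
      simp only [Bool.false_eq_true, if_false]
      have hcast2 : ((n + 1 : Nat) : Int) + (m : Int) + 1 = ((n + 1 + m + 1 : Nat) : Int) := by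
        push_cast; ring
      rw [hcast2]
      rw [PySem.List.slice_to_natCast, PySem.List.slice_natCast, PySem.List.slice_from_natCast, htk]
      obtain ⟨htk2, hdr2⟩ := pvTake_cut r hm2
      have hmid : (l.drop (n + 1)).take (n + 1 + m + 1 - (n + 1)) = (pvCut r).1 := by
        rw [hdr]
        have : n + 1 + m + 1 - (n + 1) = m + 1 := by omega
        rw [this, htk2]
      have hlast : l.drop (n + 1 + m + 1) = (pvCut r).2 := by
        have : n + 1 + m + 1 = (n + 1) + (m + 1) := by omega
        rw [this, ← List.drop_drop, hdr, hdr2]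
      rw [hmid, hlast]
      simp [pvFinish_eq]
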